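-- pv_equiv track=rewrite | github.com/juanmvazquez/UTN-TUPaD-Programacion1 | Integrador programacion/integrador.py | getCountryCountByContinent
-- ===== SOURCE A (Python) =====
-- def getCountryCountByContinent(countries):
--     continentCount = {}
--
--     for c in countries:
--         continent = c["continente"].strip().title()
--         if continent in continentCount:
--             continentCount[continent] += 1
--         else:
--             continentCount[continent] = 1
--
--     return continentCount
-- ===== SOURCE B (Python) =====
-- def _groupCounts(names):
--     # recursive partition: count the first name by removing all its occurrences,
--     # then recurse on what is left (keys stay in first-occurrence order)
--     if not names:
--         return {}
--     head = names[0]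
--     rest = [n for n in names[1:] if n != head]
--     result = {head: len(names) - len(rest)}
--     result.update(_groupCounts(rest))
--     return result
--
--
-- def getCountryCountByContinent(countries):
--     names = [c["continente"].strip().title() for c in countries]
--     return _groupCounts(names)
-- ===== Notes on version B (the rewrite author's own statement) =====
-- stated objective: alternative
-- what changed: Replaces the dict-accumulation single pass by a recursive partition scheme with no counting dict at all: normalize all names, then repeatedly take the first remaining name, drop every occurrence of it from the rest (its count is the length difference), and recurse on the survivors.
import Mathlib
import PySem

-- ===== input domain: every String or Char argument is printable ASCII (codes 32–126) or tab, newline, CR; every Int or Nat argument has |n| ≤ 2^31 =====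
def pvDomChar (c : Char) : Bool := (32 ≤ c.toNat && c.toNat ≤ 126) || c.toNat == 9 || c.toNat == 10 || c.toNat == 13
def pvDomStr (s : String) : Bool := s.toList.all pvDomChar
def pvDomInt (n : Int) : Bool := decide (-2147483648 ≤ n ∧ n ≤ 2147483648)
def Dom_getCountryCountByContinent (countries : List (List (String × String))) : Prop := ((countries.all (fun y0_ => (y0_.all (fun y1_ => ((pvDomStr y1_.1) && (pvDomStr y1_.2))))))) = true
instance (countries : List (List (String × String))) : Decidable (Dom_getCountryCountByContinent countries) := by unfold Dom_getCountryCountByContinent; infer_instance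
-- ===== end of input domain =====

-- B replaces A's incremental dict counting by a recursive partition: take the first normalized name,
-- remove all its occurrences (count = length difference), recurse on the survivors (not claimed faster).

-- shared helper: Python's str.title() on the ASCII domain (uppercase a letter after a non-letter,
-- lowercase a letter after a letter); exact on Dom's printable-ASCII strings
def pvTitleChars : Bool → List Char → List Char
  | _, [] => []
  | prev, c :: cs =>
      (if c.isAlpha then (if prev then c.toLower else c.toUpper) else c) :: pvTitleChars c.isAlpha cs

-- shared helper: c["continente"].strip().title() (total form of the lookup; Pre_ guarantees the key)
def pvNorm (c : List (String × String)) : String :=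
  String.ofList (pvTitleChars false (PySem.Str.strip ((PySem.Dict.ofList c).getD "continente" "")).toList)

-- ===== PORT A =====
def getCountryCountByContinent (countries : List (List (String × String))) : List (String × Int) :=
  (countries.foldl (fun d c =>
      let continent := pvNorm c
      if d.contains continent then d.insert continent (d.getD continent 0 + 1)
      else d.insert continent 1) PySem.Dict.empty).items

-- ===== PORT B =====
-- _groupCounts: the recursive partition of Source B; `result.update(_groupCounts(rest))` is a plain
-- cons/append because `rest` contains no occurrence of `head`, so the keys are disjoint
def pvGroupCounts : List String → List (String × Int)
  | [] => []
  | head :: t =>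
      (head, ((t.length + 1 : Nat) : Int) - (t.filter (fun n => n != head)).length)
        :: pvGroupCounts (t.filter (fun n => n != head))
termination_by l => l.length
decreasing_by
  simp only [List.unattach_filter, List.unattach_attach]
  exact Nat.lt_succ_of_le (List.length_filter_le _ _)

def getCountryCountByContinent_alt (countries : List (List (String × String))) : List (String × Int) :=
  pvGroupCounts (countries.map pvNorm)

-- ===== PRECONDITION & SPEC =====
-- Pre_ excludes exactly the countries lacking a "continente" key, on which Python A raises KeyError.
def Pre_getCountryCountByContinent (countries : List (List (String × String))) : Prop :=
  (countries.all (fun c => c.any (fun p => p.1 == "continente"))) = true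
instance (countries : List (List (String × String))) : Decidable (Pre_getCountryCountByContinent countries) := by unfold Pre_getCountryCountByContinent; infer_instance
def pvWitness_getCountryCountByContinent : (List (List (String × String))) :=
  [[("continente", " eurOpa ")], [("continente", "Asia")]]

def Spec_getCountryCountByContinent (countries : List (List (String × String))) (out : List (String × Int)) : Prop := out = getCountryCountByContinent_alt countries
instance (countries : List (List (String × String))) (out : List (String × Int)) : Decidable (Spec_getCountryCountByContinent countries out) := by unfold Spec_getCountryCountByContinent; infer_instance

-- ===== CLAIM (what is proved, stated in full; the proofs are below) =====
def Claim_equal_getCountryCountByContinent : Prop := ∀ (countries : List (List (String × String))), Dom_getCountryCountByContinent countries → Pre_getCountryCountByContinent countries → Spec_getCountryCountByContinent countries (getCountryCountByContinent countries)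

-- ===== LEMMAS AND PROOFS =====

-- A's loop over names builds exactly Counter(names)
lemma Afold_eq_counter (names : List String) :
    names.foldl (fun d n =>
      if d.contains n then d.insert n (d.getD n 0 + 1) else d.insert n 1) PySem.Dict.empty
    = PySem.Dict.counter names := by
  have hstep : (fun (d : PySem.Dict String Int) n =>
      if d.contains n then d.insert n (d.getD n 0 + 1) else d.insert n 1)
      = (fun d n => d.insert n (d.getD n 0 + 1)) := by
    funext d n
    by_cases h : d.contains n = true
    · simp [h]
    · have h' : d.contains n = false := by simpa using h
      simp [h', PySem.Dict.getD_of_not_contains d (0:Int) h']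
  rw [hstep, PySem.Dict.foldl_insert_getD_add_one_eq_counter]

-- removing every occurrence of x shortens a list by exactly count x
lemma length_filter_ne_add_count (t : List String) (x : String) :
    (t.filter (fun n => n != x)).length + t.count x = t.length := by
  induction t with
  | nil => simp
  | cons a t ih =>
    by_cases h : a = x
    · subst h; simp; omega
    · simp [h, bne_iff_ne]
      omega

-- set(filter) = filter(set)
lemma ofList_filter (p : String → Bool) (l : List String) :
    PySem.Set.ofList (l.filter p) = (PySem.Set.ofList l).filter p := by
  induction l with
  | nil => simp [PySem.Set.ofList]
  | cons x t ih =>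
    by_cases h : p x = true
    · rw [List.filter_cons_of_pos h, PySem.Set.ofList_cons, PySem.Set.ofList_cons, ih]
      simp only [PySem.Set.discard, List.filter_filter, List.filter_cons_of_pos h]
      congr 1
      exact List.filter_congr (fun y _ => by rw [Bool.and_comm])
    · have h' : p x = false := by simpa using h
      rw [List.filter_cons_of_neg (by simp [h']), PySem.Set.ofList_cons, ih,
          List.filter_cons_of_neg (by simp [h'])]
      simp only [PySem.Set.discard, List.filter_filter]
      refine (List.filter_congr ?_).symm
      intro y _
      by_cases hy : y = x
      · subst hy; simp [h']
      · simp [hy]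

-- B's recursion computes Counter(l).items()
lemma group_eq_counter_items (l : List String) :
    pvGroupCounts l = (PySem.Set.ofList l).map (fun k => (k, (List.count k l : Int))) := by
  induction l using pvGroupCounts.induct with
  | case1 => simp [pvGroupCounts, PySem.Set.ofList]
  | case2 head t ih =>
    simp only [List.unattach_filter, List.unattach_attach] at ih
    rw [pvGroupCounts, PySem.Set.ofList_cons, List.map_cons]
    congr 1
    · have h := length_filter_ne_add_count t head
      have hc : List.count head (head :: t) = t.count head + 1 := by
        simp
      rw [hc]
      simp only [Prod.mk.injEq, true_and]
      omega
    · have hr : PySem.Set.ofList (t.filter (fun n => n != head))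
          = (PySem.Set.ofList t).discard head := by
        rw [ofList_filter]
        rfl
      rw [ih, hr]
      refine List.map_congr_left ?_
      intro k hk
      have hkne : k ≠ head := by
        simp only [PySem.Set.discard, List.mem_filter] at hk
        simpa [bne_iff_ne] using hk.2
      have h1 : List.count k (head :: t) = List.count k t := by
        simp [Ne.symm hkne]
      have h2 : List.count k (t.filter (fun n => n != head)) = List.count k t :=
        List.count_filter (by simp [bne_iff_ne, hkne])
      rw [h1, h2]

-- ===== VERDICT (by name: the statement is the Claim_ definition above) =====
theorem getCountryCountByContinent_spec : Claim_equal_getCountryCountByContinent := by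
  intro countries _ _
  unfold Spec_getCountryCountByContinent getCountryCountByContinent getCountryCountByContinent_alt
  have hA : countries.foldl (fun d c =>
      let continent := pvNorm c
      if d.contains continent then d.insert continent (d.getD continent 0 + 1)
      else d.insert continent 1) PySem.Dict.empty
      = PySem.Dict.counter (countries.map pvNorm) := by
    have h0 := Afold_eq_counter (countries.map pvNorm)
    rw [List.foldl_map] at h0
    exact h0
  rw [hA, PySem.Dict.items_counter, group_eq_counter_items]
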